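-- pv_equiv track=rewrite | github.com/LorenzoCimini/Programmazione-Avanzata | STRUMENTI/RICORSIONE.py | soluzione
-- ===== SOURCE A (Python) =====
-- def get_positions(matrix):
-- 	return [[x,y] for x in range(len(matrix)) for y in range(len(matrix[0])) if matrix[x][y] == 1]
--
-- def soluzione(matrix):
-- 	already_visited = []
--
-- 	def BFS(positions, matrix_of_ones, directions= [[0,1],[1,0],[-1,0],[0,-1]], counter= 1, acc=1):
-- 		if positions not in already_visited:
-- 			already_visited.append(positions)
-- 			for direction in directions:
-- 				new_position = [positions[0] + direction[0], positions[1] + direction[1]]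
-- 				if new_position in matrix_of_ones and new_position not in already_visited:
-- 					acc = BFS(new_position, matrix_of_ones, directions, counter, acc+counter)
-- 			return acc
--
-- 	return [x for x in [ BFS(positions, [x for x in get_positions(matrix) if x != positions] ) for positions in get_positions(matrix)] if x != None]
-- ===== SOURCE B (Python) =====
-- def soluzione(matrix):
-- 	# Iterative flood fill: one row-major scan, a shared visited set,
-- 	# and an explicit stack per component (return value only; no mutation).
-- 	rows = len(matrix)
-- 	cols = len(matrix[0]) if matrix else 0
-- 	visited = set()
-- 	out = []
-- 	for x in range(rows):
-- 		for y in range(cols):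
-- 			if matrix[x][y] == 1 and (x, y) not in visited:
-- 				count = 0
-- 				stack = [(x, y)]
-- 				while stack:
-- 					qx, qy = stack.pop()
-- 					if (qx, qy) in visited:
-- 						continue
-- 					visited.add((qx, qy))
-- 					count += 1
-- 					nbrs = [(qx + dx, qy + dy) for dx, dy in ((0, 1), (1, 0), (-1, 0), (0, -1))
-- 							if 0 <= qx + dx < rows and 0 <= qy + dy < cols and matrix[qx + dx][qy + dy] == 1]
-- 					stack.extend(reversed(nbrs))
-- 				out.append(count)
-- 	return out
-- ===== Notes on version B (the rewrite author's own statement) =====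
-- stated objective: faster
-- what changed: Replaces the per-1-cell recursive flood fill over quadratic-rebuilt coordinate lists (list membership, shared visited list, one recursion per cell) by a single row-major scan with a hash visited set and an explicit per-component stack, so each cell is processed O(1) times with O(1) lookups.
import Mathlib
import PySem

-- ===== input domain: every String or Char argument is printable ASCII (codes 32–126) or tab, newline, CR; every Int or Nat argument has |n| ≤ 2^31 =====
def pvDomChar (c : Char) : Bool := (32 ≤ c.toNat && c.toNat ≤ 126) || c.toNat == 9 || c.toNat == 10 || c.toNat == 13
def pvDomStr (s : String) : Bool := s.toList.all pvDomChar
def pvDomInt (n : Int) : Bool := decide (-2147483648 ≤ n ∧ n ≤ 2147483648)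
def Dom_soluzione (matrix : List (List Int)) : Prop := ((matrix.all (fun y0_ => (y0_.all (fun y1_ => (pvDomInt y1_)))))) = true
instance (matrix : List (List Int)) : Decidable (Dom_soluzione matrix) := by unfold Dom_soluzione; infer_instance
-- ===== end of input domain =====

-- B replaces A's per-cell recursive flood fill over rebuilt coordinate lists by one
-- row-major scan with a visited set and an explicit per-component stack (faster).
-- Both ports use a fuel counter solely as a totality guard (chosen large enough; proved sufficient).

-- ===== PORT A =====

-- directions = [[0,1],[1,0],[-1,0],[0,-1]] (shared literal; positions ported as Int pairs)
def pvDirs : List (Int × Int) := [(0, 1), (1, 0), (-1, 0), (0, -1)]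

-- get_positions: [[x,y] for x in range(len(matrix)) for y in range(len(matrix[0])) if matrix[x][y] == 1]
-- (indexing via getD is exact for the in-range indices admitted by Pre_soluzione)
def getPositions (matrix : List (List Int)) : List (Int × Int) :=
  (List.range matrix.length).flatMap (fun x =>
    (List.range matrix.headI.length).filterMap (fun y =>
      if (matrix.getD x []).getD y 0 = 1 then some ((x : Int), (y : Int)) else none))

-- one iteration of BFS's `for direction in directions` loop (state = (acc, already_visited));
-- the inner `_ => none` arm is unreachable (the guard ensures the callee takes its main branch)
def aStep (mOnes : List (Int × Int))
    (rec : (Int × Int) → List (Int × Int) → Int → Option (Option Int × List (Int × Int)))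
    (p : Int × Int) (counter : Int)
    (st : Option (Int × List (Int × Int))) (d : Int × Int) : Option (Int × List (Int × Int)) :=
  match st with
  | none => none
  | some (acc, vis) =>
    let np : Int × Int := (p.1 + d.1, p.2 + d.2)
    if np ∈ mOnes ∧ np ∉ vis then
      match rec np vis (acc + counter) with
      | some (some r, vis') => some (r, vis')
      | _ => none
    else some (acc, vis)

-- BFS(positions, matrix_of_ones, directions, counter, acc) with the shared mutable
-- already_visited threaded through; `some (none, vis)` is Python's `return None` path.
def aBFS (mOnes : List (Int × Int)) (counter : Int) :
    Nat → (Int × Int) → List (Int × Int) → Int → Option (Option Int × List (Int × Int))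
  | 0, _, _, _ => none            -- fuel guard only (never reached at the fuel used below)
  | f + 1, p, vis, acc =>
    if p ∈ vis then some (none, vis)
    else
      match pvDirs.foldl (aStep mOnes (aBFS mOnes counter f) p counter) (some (acc, vis ++ [p])) with
      | some (acc', vis') => some (some acc', vis')
      | none => none

-- one element of the outer comprehension: BFS(p, [x for x in get_positions(matrix) if x != p])
def aOuterStep (matrix : List (List Int)) (fuelA : Nat)
    (st : List (Int × Int) × List (Option Int)) (p : Int × Int) :
    List (Int × Int) × List (Option Int) :=
  match aBFS ((getPositions matrix).filter (fun q => q != p)) 1 fuelA p st.1 1 with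
  | some (o, vis') => (vis', st.2 ++ [o])
  | none => st

def soluzione (matrix : List (List Int)) : List Int :=
  (((getPositions matrix).foldl
      (aOuterStep matrix ((getPositions matrix).length + 1)) ([], [])).2).filterMap id

-- ===== PORT B =====

-- the neighbour test: 0 <= nx < rows and 0 <= ny < cols and matrix[nx][ny] == 1
def bTest (matrix : List (List Int)) (rows cols : Nat) (q : Int × Int) : Bool :=
  decide (0 ≤ q.1) && decide (q.1 < (rows : Int)) && decide (0 ≤ q.2) &&
    decide (q.2 < (cols : Int)) && decide ((matrix.getD q.1.toNat []).getD q.2.toNat 0 = 1)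

-- in-bounds 1-valued 4-neighbours of q, in direction order
def bNbrs (matrix : List (List Int)) (rows cols : Nat) (q : Int × Int) : List (Int × Int) :=
  pvDirs.filterMap (fun d =>
    let nq : Int × Int := (q.1 + d.1, q.2 + d.2)
    if bTest matrix rows cols nq then some nq else none)

-- the `while stack:` loop; the list head is the stack top, so `nbrs ++ rest` is
-- Python's stack.extend(reversed(nbrs)); visited is a PySem.Set (add = append if new)
def bStack (matrix : List (List Int)) (rows cols : Nat) :
    Nat → List (Int × Int) → List (Int × Int) → Int → Option (Int × List (Int × Int))
  | 0, stack, vis, cnt =>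
    match stack with
    | [] => some (cnt, vis)
    | _ :: _ => none            -- fuel guard only (never reached at the fuel used below)
  | f + 1, stack, vis, cnt =>
    match stack with
    | [] => some (cnt, vis)
    | q :: rest =>
      if q ∈ vis then bStack matrix rows cols f rest vis cnt
      else bStack matrix rows cols f (bNbrs matrix rows cols q ++ rest)
        (PySem.Set.add vis q) (cnt + 1)

-- body of the row-major scan: if matrix[x][y] == 1 and (x,y) not in visited: flood fill
def bCellStep (matrix : List (List Int)) (rows cols : Nat) (fuelB : Nat)
    (st : List (Int × Int) × List Int) (q : Int × Int) : List (Int × Int) × List Int :=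
  if (matrix.getD q.1.toNat []).getD q.2.toNat 0 = 1 ∧ q ∉ st.1 then
    match bStack matrix rows cols fuelB [q] st.1 0 with
    | some (c, vis') => (vis', st.2 ++ [c])
    | none => st
  else st

-- rows = len(matrix), cols = len(matrix[0]) if matrix else 0
def soluzione_alt (matrix : List (List Int)) : List Int :=
  ((List.range matrix.length).foldl (fun st (x : Nat) =>
      (List.range matrix.headI.length).foldl (fun st (y : Nat) =>
        bCellStep matrix matrix.length matrix.headI.length
          (5 * (matrix.length * matrix.headI.length) + 1) st ((x : Int), (y : Int))) st)
    (([], []) : List (Int × Int) × List Int)).2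

-- ===== PRECONDITION & SPEC =====

-- Pre_ excludes exactly the jagged matrices with a row shorter than row 0, on which the
-- Python A raises IndexError while indexing matrix[x][y] (B raises there as well).
def Pre_soluzione (matrix : List (List Int)) : Prop :=
  ∀ row ∈ matrix, matrix.headI.length ≤ row.length
instance (matrix : List (List Int)) : Decidable (Pre_soluzione matrix) := by
  unfold Pre_soluzione; infer_instance

def pvWitness_soluzione : List (List Int) := [[1, 1, 0], [0, 0, 1]]

def Spec_soluzione (matrix : List (List Int)) (out : List Int) : Prop := out = soluzione_alt matrix
instance (matrix : List (List Int)) (out : List Int) : Decidable (Spec_soluzione matrix out) := by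
  unfold Spec_soluzione; infer_instance

-- ===== CLAIM (what is proved, stated in full; the proofs are below) =====
def Claim_equal_soluzione : Prop :=
  ∀ (matrix : List (List Int)), Dom_soluzione matrix → Pre_soluzione matrix →
    Spec_soluzione matrix (soluzione matrix)

-- ===== LEMMAS AND PROOFS =====

lemma foldl_aStep_none (mOnes : List (Int × Int))
    (rec : (Int × Int) → List (Int × Int) → Int → Option (Option Int × List (Int × Int)))
    (p : Int × Int) (counter : Int) (ds : List (Int × Int)) :
    ds.foldl (aStep mOnes rec p counter) none = none := by
  induction ds with
  | nil => rfl
  | cons d ds ih => simpa [aStep] using ih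

-- growth/shape of one BFS call: the visited list only grows by p and fresh mOnes-cells,
-- and the returned accumulator counts exactly the newly visited cells
lemma aStep_fold_growth (mOnes : List (Int × Int))
    (rec : (Int × Int) → List (Int × Int) → Int → Option (Option Int × List (Int × Int)))
    (hrec : ∀ (p : Int × Int) (vis : List (Int × Int)) (acc : Int) (o : Option Int)
      (visA : List (Int × Int)), rec p vis acc = some (o, visA) →
      (p ∈ vis → o = none ∧ visA = vis) ∧
      (p ∉ vis → ∃ t r, o = some r ∧ visA = vis ++ p :: t ∧ r = acc + (t.length : Int) ∧
        (∀ q ∈ t, q ∈ mOnes) ∧ (vis.Nodup → visA.Nodup)))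
    (p : Int × Int) (ds : List (Int × Int)) :
    ∀ (acc0 : Int) (vis0 : List (Int × Int)) (acc' : Int) (vis' : List (Int × Int)),
    ds.foldl (aStep mOnes rec p 1) (some (acc0, vis0)) = some (acc', vis') →
    ∃ u, vis' = vis0 ++ u ∧ acc' = acc0 + (u.length : Int) ∧ (∀ q ∈ u, q ∈ mOnes) ∧
      (vis0.Nodup → vis'.Nodup) := by
  induction ds with
  | nil =>
    intro acc0 vis0 acc' vis' h
    obtain ⟨rfl, rfl⟩ : acc0 = acc' ∧ vis0 = vis' := by
      simpa using h
    exact ⟨[], by simp⟩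
  | cons d ds ih =>
    intro acc0 vis0 acc' vis' h
    simp only [List.foldl_cons, aStep] at h
    by_cases hg : (p.1 + d.1, p.2 + d.2) ∈ mOnes ∧ (p.1 + d.1, p.2 + d.2) ∉ vis0
    · rw [if_pos hg] at h
      cases hr : rec (p.1 + d.1, p.2 + d.2) vis0 (acc0 + 1) with
      | none =>
        rw [hr] at h
        rw [foldl_aStep_none] at h
        cases h
      | some pr =>
        obtain ⟨o1, v1⟩ := pr
        rw [hr] at h
        obtain ⟨t, r, rfl, hv1, hrval, htm, hnd⟩ := (hrec _ _ _ _ _ hr).2 hg.2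
        obtain ⟨u', hvis', hacc', hmem', hnd'⟩ := ih _ _ _ _ h
        refine ⟨((p.1 + d.1, p.2 + d.2) :: t) ++ u', ?_, ?_, ?_, ?_⟩
        · rw [hvis', hv1]; simp
        · rw [hacc', hrval]; simp only [List.length_append, List.length_cons]; push_cast; ring
        · intro q hq
          rcases List.mem_append.1 hq with hq | hq
          · rcases List.mem_cons.1 hq with rfl | hq
            · exact hg.1
            · exact htm q hq
          · exact hmem' q hq
        · intro hnd0
          exact hnd' (hnd hnd0)
    · rw [if_neg hg] at h
      exact ih _ _ _ _ h

lemma aBFS_growth (f : Nat) : ∀ (mOnes : List (Int × Int)) (p : Int × Int)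
    (vis : List (Int × Int)) (acc : Int) (o : Option Int) (visA : List (Int × Int)),
    aBFS mOnes 1 f p vis acc = some (o, visA) →
    (p ∈ vis → o = none ∧ visA = vis) ∧
    (p ∉ vis → ∃ t r, o = some r ∧ visA = vis ++ p :: t ∧ r = acc + (t.length : Int) ∧
      (∀ q ∈ t, q ∈ mOnes) ∧ (vis.Nodup → visA.Nodup)) := by
  induction f with
  | zero => intro mOnes p vis acc o visA h; simp [aBFS] at h
  | succ f ih =>
    intro mOnes p vis acc o visA h
    simp only [aBFS] at h
    by_cases hp : p ∈ vis
    · rw [if_pos hp] at h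
      have h2 := Option.some.inj h
      obtain ⟨rfl, rfl⟩ : o = none ∧ visA = vis :=
        ⟨(congrArg Prod.fst h2).symm, (congrArg Prod.snd h2).symm⟩
      exact ⟨fun _ => ⟨rfl, rfl⟩, fun hnp => absurd hp hnp⟩
    · rw [if_neg hp] at h
      cases hfold : pvDirs.foldl (aStep mOnes (aBFS mOnes 1 f) p 1) (some (acc, vis ++ [p])) with
      | none => rw [hfold] at h; cases h
      | some st =>
        obtain ⟨acc', vis'⟩ := st
        rw [hfold] at h
        have h2 := Option.some.inj h
        obtain ⟨rfl, rfl⟩ : o = some acc' ∧ visA = vis' :=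
          ⟨(congrArg Prod.fst h2).symm, (congrArg Prod.snd h2).symm⟩
        obtain ⟨u, hvis', hacc', hmem, hnd⟩ := aStep_fold_growth mOnes _ (ih mOnes) p pvDirs _ _ _ _ hfold
        refine ⟨fun hin => absurd hin hp, fun _ => ⟨u, acc', rfl, ?_, hacc', hmem, ?_⟩⟩
        · rw [hvis']; simp
        · intro hndv
          apply hnd
          simp [List.nodup_append, hndv]
          intro a b hab heq
          exact hp (heq ▸ hab)

lemma length_filter_anti (l vis vis' : List (Int × Int)) (hsub : ∀ x ∈ vis, x ∈ vis') :
    (l.filter (fun q => q ∉ vis')).length ≤ (l.filter (fun q => q ∉ vis)).length :=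
  (List.monotone_filter_right l (fun a ha => by
    simp only [decide_eq_true_eq] at ha ⊢
    exact fun hin => ha (hsub a hin))).length_le

lemma length_filter_strict (l vis vis' : List (Int × Int)) (hsub : ∀ x ∈ vis, x ∈ vis')
    (a : Int × Int) (hal : a ∈ l) (han : a ∉ vis) (ha' : a ∈ vis') :
    (l.filter (fun q => q ∉ vis')).length < (l.filter (fun q => q ∉ vis)).length := by
  have hsb : List.Sublist (l.filter (fun q => decide (q ∉ vis'))) (l.filter (fun q => decide (q ∉ vis))) :=
    List.monotone_filter_right l (fun x hx => by
      simp only [decide_eq_true_eq] at hx ⊢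
      exact fun hin => hx (hsub x hin))
  refine Nat.lt_of_le_of_ne hsb.length_le (fun hlen => ?_)
  have heq := hsb.eq_of_length hlen
  have hmem : a ∈ l.filter (fun q => decide (q ∉ vis)) := List.mem_filter.2 ⟨hal, by simpa using han⟩
  rw [← heq] at hmem
  exact absurd (List.mem_filter.1 hmem).2 (by simpa using ha')

-- the fuel ones.length + 1 is always sufficient for aBFS
lemma aStep_fold_total (ones mOnes : List (Int × Int)) (f : Nat)
    (hsub : ∀ q ∈ mOnes, q ∈ ones)
    (htot : ∀ (p : Int × Int) (vis : List (Int × Int)) (acc : Int), p ∈ ones →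
      (ones.dedup.filter (fun q => q ∉ vis)).length < f →
      ∃ out, aBFS mOnes 1 f p vis acc = some out)
    (p : Int × Int) (ds : List (Int × Int)) :
    ∀ (acc0 : Int) (vis0 : List (Int × Int)),
    (ones.dedup.filter (fun q => q ∉ vis0)).length < f →
    ∃ st', ds.foldl (aStep mOnes (aBFS mOnes 1 f) p 1) (some (acc0, vis0)) = some st' := by
  induction ds with
  | nil => intro acc0 vis0 _; exact ⟨(acc0, vis0), rfl⟩
  | cons d ds ih =>
    intro acc0 vis0 hm
    simp only [List.foldl_cons, aStep]
    by_cases hg : (p.1 + d.1, p.2 + d.2) ∈ mOnes ∧ (p.1 + d.1, p.2 + d.2) ∉ vis0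
    · rw [if_pos hg]
      obtain ⟨⟨o1, v1⟩, hr⟩ := htot _ vis0 (acc0 + 1) (hsub _ hg.1) hm
      obtain ⟨t, r, rfl, hv1, -, -, -⟩ := (aBFS_growth f mOnes _ _ _ _ _ hr).2 hg.2
      rw [hr]
      refine ih r v1 ?_
      calc (ones.dedup.filter (fun q => q ∉ v1)).length
          ≤ (ones.dedup.filter (fun q => q ∉ vis0)).length := by
            refine length_filter_anti _ _ _ (fun x hx => ?_)
            rw [hv1]; exact List.mem_append.2 (Or.inl hx)
        _ < f := hm
    · rw [if_neg hg]
      exact ih acc0 vis0 hm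

lemma aBFS_total (f : Nat) : ∀ (ones mOnes : List (Int × Int)) (p : Int × Int)
    (vis : List (Int × Int)) (acc : Int),
    (∀ q ∈ mOnes, q ∈ ones) → p ∈ ones →
    (ones.dedup.filter (fun q => q ∉ vis)).length < f →
    ∃ out, aBFS mOnes 1 f p vis acc = some out := by
  induction f with
  | zero => intro ones mOnes p vis acc _ _ h; exact absurd h (Nat.not_lt_zero _)
  | succ f ih =>
    intro ones mOnes p vis acc hsub hpin hm
    by_cases hp : p ∈ vis
    · exact ⟨(none, vis), by simp [aBFS, hp]⟩
    · have hm' : (ones.dedup.filter (fun q => q ∉ vis ++ [p])).length < f := by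
        have := length_filter_strict ones.dedup vis (vis ++ [p])
          (fun x hx => List.mem_append.2 (Or.inl hx)) p (List.mem_dedup.2 hpin) hp
          (List.mem_append.2 (Or.inr (List.mem_singleton.2 rfl)))
        omega
      obtain ⟨⟨acc', vis'⟩, hfold⟩ :=
        aStep_fold_total ones mOnes f hsub (fun p' vis' acc' h1 h2 => ih ones mOnes p' vis' acc' hsub h1 h2)
          p pvDirs acc (vis ++ [p]) hm'
      exact ⟨(some acc', vis'), by simp [aBFS, hp, hfold]⟩

lemma bStack_nil (matrix : List (List Int)) (rows cols f : Nat)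
    (vis : List (Int × Int)) (cnt : Int) :
    bStack matrix rows cols f [] vis cnt = some (cnt, vis) := by
  cases f <;> rfl

lemma bStack_cons_mem (matrix : List (List Int)) (rows cols f : Nat) (q : Int × Int)
    (rest vis : List (Int × Int)) (cnt : Int) (h : q ∈ vis) :
    bStack matrix rows cols (f + 1) (q :: rest) vis cnt
      = bStack matrix rows cols f rest vis cnt := by
  simp [bStack, h]

lemma bStack_cons_new (matrix : List (List Int)) (rows cols f : Nat) (q : Int × Int)
    (rest vis : List (Int × Int)) (cnt : Int) (h : q ∉ vis) :
    bStack matrix rows cols (f + 1) (q :: rest) vis cnt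
      = bStack matrix rows cols f (bNbrs matrix rows cols q ++ rest) (vis ++ [q]) (cnt + 1) := by
  simp [bStack, h]

-- simulation (fold form): A's direction loop from an already-visited node p is what the
-- stack machine does to the corresponding pushed neighbours on top of the stack
lemma simfold (matrix : List (List Int)) (rows cols : Nat) (ones : List (Int × Int))
    (p₀ : Int × Int) (hones : ∀ q, bTest matrix rows cols q = true ↔ q ∈ ones) (f : Nat)
    (hsim : ∀ (p : Int × Int) (vis : List (Int × Int)) (acc r : Int) (visA : List (Int × Int)),
      aBFS (ones.filter (fun q => q != p₀)) 1 f p vis acc = some (some r, visA) →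
      p ∈ ones → (p₀ ∈ vis ∨ p = p₀) → vis.Nodup →
      ∃ n t, visA = vis ++ p :: t ∧ n ≤ 1 + 5 * (p :: t).length ∧
        ∀ (fB : Nat) (rest : List (Int × Int)) (cnt : Int), n ≤ fB →
          bStack matrix rows cols fB (p :: rest) vis cnt
            = bStack matrix rows cols (fB - n) rest visA (cnt + ((p :: t).length : Int)))
    (p : Int × Int) (ds : List (Int × Int)) :
    ∀ (acc0 : Int) (vis0 : List (Int × Int)) (acc' : Int) (vis' : List (Int × Int)),
    ds.foldl (aStep (ones.filter (fun q => q != p₀))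
        (aBFS (ones.filter (fun q => q != p₀)) 1 f) p 1) (some (acc0, vis0)) = some (acc', vis') →
    p₀ ∈ vis0 → vis0.Nodup →
    ∃ n u, vis' = vis0 ++ u ∧ n ≤ ds.length + 5 * u.length ∧
      ∀ (fB : Nat) (rest : List (Int × Int)) (cnt : Int), n ≤ fB →
        bStack matrix rows cols fB ((ds.filterMap (fun d =>
            if bTest matrix rows cols (p.1 + d.1, p.2 + d.2) = true
            then some ((p.1 + d.1, p.2 + d.2) : Int × Int) else none)) ++ rest) vis0 cnt
          = bStack matrix rows cols (fB - n) rest vis' (cnt + (u.length : Int)) := by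
  induction ds with
  | nil =>
    intro acc0 vis0 acc' vis' h _ _
    obtain ⟨rfl, rfl⟩ : acc0 = acc' ∧ vis0 = vis' := by simpa using h
    exact ⟨0, [], by simp⟩
  | cons d ds ih =>
    intro acc0 vis0 acc' vis' h hp₀ hnd
    simp only [List.foldl_cons, aStep] at h
    by_cases hg : (p.1 + d.1, p.2 + d.2) ∈ ones.filter (fun q => q != p₀)
        ∧ (p.1 + d.1, p.2 + d.2) ∉ vis0
    · rw [if_pos hg] at h
      cases hr : aBFS (ones.filter (fun q => q != p₀)) 1 f (p.1 + d.1, p.2 + d.2) vis0 (acc0 + 1) with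
      | none => rw [hr, foldl_aStep_none] at h; cases h
      | some pr =>
        obtain ⟨o1, v1⟩ := pr
        rw [hr] at h
        obtain ⟨t1, r1, rfl, hv1, hr1, htm, hndf⟩ :=
          (aBFS_growth f (ones.filter (fun q => q != p₀)) _ _ _ _ _ hr).2 hg.2
        have hnpones : (p.1 + d.1, p.2 + d.2) ∈ ones := (List.mem_filter.1 hg.1).1
        obtain ⟨n1, t1', hv1', hb1, heq1⟩ :=
          hsim (p.1 + d.1, p.2 + d.2) vis0 (acc0 + 1) r1 v1 hr hnpones (Or.inl hp₀) hnd
        have hndv1 : v1.Nodup := hndf hnd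
        have hp₀v1 : p₀ ∈ v1 := by rw [hv1']; exact List.mem_append.2 (Or.inl hp₀)
        obtain ⟨n', u', hvis', hb', heq'⟩ := ih r1 v1 acc' vis' h hp₀v1 hndv1
        refine ⟨n1 + n', ((p.1 + d.1, p.2 + d.2) :: t1') ++ u', ?_, ?_, ?_⟩
        · rw [hvis', hv1']; simp
        · simp only [List.length_append, List.length_cons] at hb1 hb' ⊢; omega
        · intro fB rest cnt hfB
          have hbt : bTest matrix rows cols (p.1 + d.1, p.2 + d.2) = true := (hones _).2 hnpones
          simp only [List.filterMap_cons, hbt, if_pos, List.cons_append]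
          rw [heq1 fB _ cnt (by omega)]
          rw [heq' (fB - n1) rest _ (by omega)]
          have e1 : fB - n1 - n' = fB - (n1 + n') := by omega
          have e2 : (cnt + (((p.1 + d.1, p.2 + d.2) :: t1').length : Int)) + (u'.length : Int)
              = cnt + (((((p.1 + d.1, p.2 + d.2) :: t1') ++ u').length : Nat) : Int) := by
            push_cast [List.length_append]; ring
          rw [e1, e2]
          rfl
    · rw [if_neg hg] at h
      obtain ⟨n', u', hvis', hb', heq'⟩ := ih acc0 vis0 acc' vis' h hp₀ hnd
      by_cases hbt : bTest matrix rows cols (p.1 + d.1, p.2 + d.2) = true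
      · have hnpvis : (p.1 + d.1, p.2 + d.2) ∈ vis0 := by
          rcases (not_and_or).1 hg with hnm | hv
          · have hnp₀ : (p.1 + d.1, p.2 + d.2) = p₀ := by
              by_contra hne
              exact hnm (List.mem_filter.2 ⟨(hones _).1 hbt, by simpa [bne_iff_ne] using hne⟩)
            rw [hnp₀]; exact hp₀
          · exact not_not.1 hv
        refine ⟨n' + 1, u', hvis', by simp only [List.length_cons]; omega, ?_⟩
        intro fB rest cnt hfB
        simp only [List.filterMap_cons, hbt, if_pos, List.cons_append]
        obtain ⟨fB', rfl⟩ : ∃ fB', fB = fB' + 1 := ⟨fB - 1, by omega⟩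
        rw [bStack_cons_mem _ _ _ _ _ _ _ _ hnpvis]
        rw [heq' fB' rest cnt (by omega)]
        have e1 : fB' - n' = fB' + 1 - (n' + 1) := by omega
        rw [e1]
      · refine ⟨n', u', hvis', by simp only [List.length_cons]; omega, ?_⟩
        intro fB rest cnt hfB
        simp only [List.filterMap_cons, hbt, if_neg, Bool.false_eq_true, not_false_iff]
        exact heq' fB rest cnt hfB

-- simulation: one recursive BFS call is exactly what the stack machine does to the
-- stack top, consuming some fuel n bounded by 5·(number of newly visited cells) + 1
lemma sim (f : Nat) : ∀ (matrix : List (List Int)) (rows cols : Nat)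
    (ones : List (Int × Int)) (p₀ : Int × Int),
    (∀ q, bTest matrix rows cols q = true ↔ q ∈ ones) →
    ∀ (p : Int × Int) (vis : List (Int × Int)) (acc r : Int) (visA : List (Int × Int)),
    aBFS (ones.filter (fun q => q != p₀)) 1 f p vis acc = some (some r, visA) →
    p ∈ ones → (p₀ ∈ vis ∨ p = p₀) → vis.Nodup →
    ∃ n t, visA = vis ++ p :: t ∧ n ≤ 1 + 5 * (p :: t).length ∧
      ∀ fB (rest : List (Int × Int)) (cnt : Int), n ≤ fB →
        bStack matrix rows cols fB (p :: rest) vis cnt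
          = bStack matrix rows cols (fB - n) rest visA (cnt + ((p :: t).length : Int)) := by
  induction f with
  | zero => intro matrix rows cols ones p₀ hones p vis acc r visA h; simp [aBFS] at h
  | succ f ih =>
    intro matrix rows cols ones p₀ hones p vis acc r visA h hpin hp₀ hnd
    simp only [aBFS] at h
    by_cases hp : p ∈ vis
    · rw [if_pos hp] at h; simp at h
    · rw [if_neg hp] at h
      cases hfold : pvDirs.foldl (aStep (ones.filter (fun q => q != p₀))
          (aBFS (ones.filter (fun q => q != p₀)) 1 f) p 1) (some (acc, vis ++ [p])) with
      | none => rw [hfold] at h; cases h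
      | some st =>
        obtain ⟨acc1, vis1⟩ := st
        rw [hfold] at h
        have h2 := Option.some.inj h
        have hvisA : visA = vis1 := (congrArg Prod.snd h2).symm
        have hp₀' : p₀ ∈ vis ++ [p] := by
          rcases hp₀ with hl | rfl
          · exact List.mem_append.2 (Or.inl hl)
          · exact List.mem_append.2 (Or.inr (List.mem_singleton.2 rfl))
        have hnd' : (vis ++ [p]).Nodup := by
          simp [List.nodup_append, hnd]
          intro a b hab heq
          exact hp (heq ▸ hab)
        obtain ⟨nf, u, hvis1, hbf, heqf⟩ :=
          simfold matrix rows cols ones p₀ hones f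
            (fun p' vis' acc' r' visA' h' h1 h2 h3 =>
              ih matrix rows cols ones p₀ hones p' vis' acc' r' visA' h' h1 h2 h3)
            p pvDirs acc (vis ++ [p]) acc1 vis1 hfold hp₀' hnd'
        refine ⟨nf + 1, u, ?_, ?_, ?_⟩
        · rw [hvisA, hvis1]; simp
        · have : pvDirs.length = 4 := rfl
          simp only [List.length_cons]; omega
        · intro fB rest cnt hfB
          obtain ⟨fB', rfl⟩ : ∃ fB', fB = fB' + 1 := ⟨fB - 1, by omega⟩
          rw [bStack_cons_new _ _ _ _ _ _ _ _ hp]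
          have hnbrs : bNbrs matrix rows cols p = pvDirs.filterMap (fun d =>
              if bTest matrix rows cols (p.1 + d.1, p.2 + d.2) = true
              then some ((p.1 + d.1, p.2 + d.2) : Int × Int) else none) := by
            simp [bNbrs]
          rw [hnbrs, heqf fB' rest (cnt + 1) (by omega)]
          have e1 : fB' - nf = fB' + 1 - (nf + 1) := by omega
          have e2 : (cnt + 1) + (u.length : Int) = cnt + (((p :: u).length : Nat) : Int) := by
            push_cast [List.length_cons]; ring
          rw [e1, e2, hvisA]

-- the cells of the row-major scan
def cellList (rows cols : Nat) : List (Int × Int) :=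
  (List.range rows).flatMap (fun (x : Nat) =>
    (List.range cols).map (fun (y : Nat) => ((x : Int), (y : Int))))

def valTest (matrix : List (List Int)) (q : Int × Int) : Bool :=
  decide ((matrix.getD q.1.toNat []).getD q.2.toNat 0 = 1)

lemma filterMap_ite {α β : Type} (l : List α) (P : α → Prop) [DecidablePred P] (f : α → β) :
    l.filterMap (fun a => if P a then some (f a) else none)
      = (l.filter (fun a => decide (P a))).map f := by
  induction l with
  | nil => simp
  | cons a l ih => by_cases h : P a <;> simp [h, ih]

lemma mem_getPositions_iff (matrix : List (List Int)) (q : Int × Int) :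
    bTest matrix matrix.length matrix.headI.length q = true ↔ q ∈ getPositions matrix := by
  constructor
  · intro h
    have h' : 0 ≤ q.1 ∧ q.1 < (matrix.length : Int) ∧ 0 ≤ q.2 ∧ q.2 < ((matrix.headI.length : Nat) : Int)
        ∧ (matrix.getD q.1.toNat []).getD q.2.toNat 0 = 1 := by
      simpa [bTest, Bool.and_eq_true, decide_eq_true_eq, and_assoc] using h
    obtain ⟨h1, h2, h3, h4, h5⟩ := h'
    refine List.mem_flatMap.2 ⟨q.1.toNat, List.mem_range.2 (by omega), ?_⟩
    refine List.mem_filterMap.2 ⟨q.2.toNat, List.mem_range.2 (by omega), ?_⟩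
    rw [if_pos h5]
    have e1 : ((q.1.toNat : Int)) = q.1 := Int.toNat_of_nonneg h1
    have e2 : ((q.2.toNat : Int)) = q.2 := Int.toNat_of_nonneg h3
    simp [e1, e2]
  · intro h
    obtain ⟨x, hx, hy⟩ := List.mem_flatMap.1 h
    obtain ⟨y, hyr, hsome⟩ := List.mem_filterMap.1 hy
    by_cases hv : (matrix.getD x []).getD y 0 = 1
    · rw [if_pos hv] at hsome
      have hq : q = ((x : Int), (y : Int)) := by
        have := Option.some.inj hsome; exact this.symm
      subst hq
      have hx' := List.mem_range.1 hx
      have hy' := List.mem_range.1 hyr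
      simp only [bTest, Int.toNat_natCast, Bool.and_eq_true, decide_eq_true_eq]
      refine ⟨⟨⟨⟨by positivity, by exact_mod_cast hx'⟩, by positivity⟩, by exact_mod_cast hy'⟩, hv⟩
    · rw [if_neg hv] at hsome; exact absurd hsome (by simp)

lemma filter_flatMap' {α β : Type} (l : List α) (g : α → List β) (p : β → Bool) :
    (l.flatMap g).filter p = l.flatMap (fun a => (g a).filter p) := by
  induction l with
  | nil => rfl
  | cons a l ih => simp [List.flatMap_cons, List.filter_append, ih]

lemma ones_eq_filter (matrix : List (List Int)) :
    getPositions matrix = (cellList matrix.length matrix.headI.length).filter (valTest matrix) := by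
  unfold getPositions cellList
  rw [filter_flatMap']
  refine List.flatMap_congr (l := List.range matrix.length) (fun x _ => ?_)
  rw [filterMap_ite (List.range matrix.headI.length)
    (fun y => (matrix.getD x []).getD y 0 = 1) (fun y => ((x : Int), (y : Int))),
    List.filter_map]
  rfl


lemma length_ones_le (matrix : List (List Int)) :
    (getPositions matrix).length ≤ matrix.length * matrix.headI.length := by
  unfold getPositions
  rw [List.length_flatMap]
  have h := List.sum_le_card_nsmul ((List.range matrix.length).map (fun x =>
      ((List.range matrix.headI.length).filterMap (fun y =>
        if (matrix.getD x []).getD y 0 = 1 then some ((x : Int), (y : Int)) else none)).length))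
    matrix.headI.length ?_
  · simpa [smul_eq_mul] using h
  · intro n hn
    obtain ⟨x, _, rfl⟩ := List.mem_map.1 hn
    exact le_trans (List.length_filterMap_le _ _) (by simp)

-- the component step of B restricted to 1-cells
def stepB' (matrix : List (List Int)) (st : List (Int × Int) × List Int) (q : Int × Int) :
    List (Int × Int) × List Int :=
  if q ∉ st.1 then
    match bStack matrix matrix.length matrix.headI.length
        (5 * (matrix.length * matrix.headI.length) + 1) [q] st.1 0 with
    | some (c, vis') => (vis', st.2 ++ [c])
    | none => st
  else st

lemma foldl_cellList {σ : Type} (rows cols : Nat) (g : σ → Int × Int → σ) (init : σ) :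
    (List.range rows).foldl (fun st (x : Nat) =>
        (List.range cols).foldl (fun st (y : Nat) => g st ((x : Int), (y : Int))) st) init
      = (cellList rows cols).foldl g init := by
  unfold cellList
  induction rows generalizing init with
  | zero => rfl
  | succ n ih =>
    rw [List.range_succ, List.flatMap_append, List.foldl_append, List.foldl_append, ih]
    simp [List.foldl_map]

lemma bCellStep_eq (matrix : List (List Int)) (st : List (Int × Int) × List Int) (q : Int × Int) :
    bCellStep matrix matrix.length matrix.headI.length
        (5 * (matrix.length * matrix.headI.length) + 1) st q
      = if valTest matrix q then stepB' matrix st q else st := by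
  unfold bCellStep stepB' valTest
  by_cases h1 : (matrix.getD q.1.toNat []).getD q.2.toNat 0 = 1 <;>
    by_cases h2 : q ∈ st.1 <;> split_ifs with h3 h4 <;> simp_all

lemma B_fold_eq (matrix : List (List Int)) (init : List (Int × Int) × List Int) :
    (List.range matrix.length).foldl (fun st (x : Nat) =>
        (List.range matrix.headI.length).foldl (fun st (y : Nat) =>
          bCellStep matrix matrix.length matrix.headI.length
            (5 * (matrix.length * matrix.headI.length) + 1) st ((x : Int), (y : Int))) st) init
      = (getPositions matrix).foldl (stepB' matrix) init := by
  rw [ones_eq_filter, List.foldl_filter, foldl_cellList]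
  congr 1
  funext st q
  rw [bCellStep_eq]

-- main glue: the two outer folds stay in lockstep (same visited list, matching outputs)
lemma glue (matrix : List (List Int)) :
    ∀ (cs : List (Int × Int)), (∀ q ∈ cs, q ∈ getPositions matrix) →
    ∀ (vis : List (Int × Int)) (outsA : List (Option Int)) (outB : List Int), vis.Nodup →
    ∃ w Δ,
      cs.foldl (aOuterStep matrix ((getPositions matrix).length + 1)) (vis, outsA)
        = (w, outsA ++ Δ) ∧
      cs.foldl (stepB' matrix) (vis, outB) = (w, outB ++ Δ.filterMap id) := by
  intro cs
  induction cs with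
  | nil => intro _ vis outsA outB _; exact ⟨vis, [], by simp⟩
  | cons p cs ih =>
    intro hcs vis outsA outB hnd
    have hpin : p ∈ getPositions matrix := hcs p List.mem_cons_self
    have hmOnes : ∀ q ∈ (getPositions matrix).filter (fun q => q != p), q ∈ getPositions matrix :=
      fun q hq => (List.mem_filter.1 hq).1
    have hmeas : ((getPositions matrix).dedup.filter (fun q => q ∉ vis)).length
        < (getPositions matrix).length + 1 := by
      have h1 := List.length_filter_le (fun q => decide (q ∉ vis)) (getPositions matrix).dedup
      have h2 := (List.dedup_sublist (getPositions matrix)).length_le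
      omega
    obtain ⟨⟨o, visA⟩, hcall⟩ := aBFS_total ((getPositions matrix).length + 1)
      (getPositions matrix) _ p vis 1 hmOnes hpin hmeas
    by_cases hp : p ∈ vis
    · obtain ⟨rfl, rfl⟩ := (aBFS_growth _ _ _ _ _ _ _ hcall).1 hp
      have hA : aOuterStep matrix ((getPositions matrix).length + 1) (visA, outsA) p
          = (visA, outsA ++ [none]) := by
        simp only [aOuterStep]; rw [hcall]
      have hB : stepB' matrix (visA, outB) p = (visA, outB) := by
        simp only [stepB']; rw [if_neg (by simpa using hp)]
      simp only [List.foldl_cons]; rw [hA, hB]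
      obtain ⟨w, Δ, ha, hb⟩ := ih (fun q hq => hcs q (List.mem_cons_of_mem _ hq))
        visA (outsA ++ [none]) outB hnd
      refine ⟨w, none :: Δ, ?_, ?_⟩
      · rw [ha]; simp
      · rw [hb]; simp
    · obtain ⟨t, r, rfl, hvisA, hr, htm, hndf⟩ := (aBFS_growth _ _ _ _ _ _ _ hcall).2 hp
      have hndA : visA.Nodup := hndf hnd
      obtain ⟨n, t', hvisA', hb, heq⟩ := sim ((getPositions matrix).length + 1) matrix
        matrix.length matrix.headI.length (getPositions matrix) p (mem_getPositions_iff matrix)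
        p vis 1 r visA hcall hpin (Or.inr rfl) hnd
      have htt : t' = t := by
        have h3 := List.append_cancel_left (hvisA'.symm.trans hvisA)
        exact (List.cons_inj_right _).1 h3
      subst htt
      have hk : (p :: t').length ≤ matrix.length * matrix.headI.length := by
        have hnodup : (p :: t').Nodup := by
          rw [hvisA'] at hndA; exact (List.nodup_append.1 hndA).2.1
        have hsubset : (p :: t') ⊆ getPositions matrix := by
          intro q hq
          rcases List.mem_cons.1 hq with rfl | hq
          · exact hpin
          · exact hmOnes q (htm q hq)
        exact le_trans (hnodup.subperm hsubset).length_le (length_ones_le matrix)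
      have hrun : bStack matrix matrix.length matrix.headI.length
          (5 * (matrix.length * matrix.headI.length) + 1) [p] vis 0
          = some (0 + (((p :: t').length : Nat) : Int), visA) := by
        rw [heq _ [] 0 (by omega), bStack_nil]
      have hA : aOuterStep matrix ((getPositions matrix).length + 1) (vis, outsA) p
          = (visA, outsA ++ [some r]) := by
        simp only [aOuterStep]; rw [hcall]
      have hB : stepB' matrix (vis, outB) p = (visA, outB ++ [r]) := by
        simp only [stepB']; rw [if_pos (by simpa using hp), hrun]
        have hval : (0 : Int) + (((p :: t').length : Nat) : Int) = r := by
          rw [hr]; push_cast [List.length_cons]; ring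
        rw [hval]
      simp only [List.foldl_cons]; rw [hA, hB]
      obtain ⟨w, Δ, ha, hb2⟩ := ih (fun q hq => hcs q (List.mem_cons_of_mem _ hq))
        visA (outsA ++ [some r]) (outB ++ [r]) hndA
      refine ⟨w, some r :: Δ, ?_, ?_⟩
      · rw [ha]; simp
      · rw [hb2]; simp

-- ===== VERDICT (by name: the statement is the Claim_ definition above) =====
theorem soluzione_spec : Claim_equal_soluzione := by
  intro matrix _ _
  unfold Spec_soluzione soluzione soluzione_alt
  rw [B_fold_eq matrix ([], [])]
  obtain ⟨w, Δ, hA, hB⟩ := glue matrix (getPositions matrix) (fun q hq => hq) [] [] [] List.nodup_nil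
  simp only [hA, hB]
  simp
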